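-- pv_equiv track=rewrite | github.com/malbolgian/aoc-2023 | sol11.py | part2
-- ===== SOURCE A (Python) =====
-- import itertools
--
-- def distance_1d(coord1: int, coord2: int, expanding: list[int], factor: int) -> int:
--     coord1, coord2 = min(coord1, coord2), max(coord1, coord2)
--     return (coord2 - coord1) + factor * (sum(coord1 < n < coord2 for n in expanding))
--
-- def part2(data: tuple[list[tuple[int, int]], list[int], list[int]]) -> int:
--     EXPANSION_FACTOR = 10 ** 6 - 1
--     stars, empty_rows, empty_cols = data
--     total = 0
--     for star1, star2 in itertools.combinations(stars, 2):
--         total += distance_1d(star1[0], star2[0], empty_rows, EXPANSION_FACTOR)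
--         total += distance_1d(star1[1], star2[1], empty_cols, EXPANSION_FACTOR)
--     return total
-- ===== SOURCE B (Python) =====
-- def part2(data):
--     factor = 10 ** 6 - 1
--     stars, empty_rows, empty_cols = data
--     xs = [s[0] for s in stars]
--     ys = [s[1] for s in stars]
--     return _axis_total(xs, empty_rows, factor) + _axis_total(ys, empty_cols, factor)
--
-- def _axis_total(coords, expanding, factor):
--     # plain pairwise |difference| sum (no inner scan of `expanding`)
--     total = 0
--     rest = coords
--     while rest:
--         c = rest[0]
--         rest = rest[1:]
--         for d in rest:
--             total += abs(c - d)
--     # each empty line n is crossed by exactly (#coords < n) * (#coords > n) pairs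
--     for n in expanding:
--         below = sum(1 for c in coords if c < n)
--         above = sum(1 for c in coords if c > n)
--         total += factor * below * above
--     return total
-- ===== Notes on version B (the rewrite author's own statement) =====
-- stated objective: faster
-- what changed: Instead of rescanning the empty-row/empty-col lists inside every star pair, B sums plain pairwise |coordinate differences| per axis and accounts for each empty line once, as factor * (#stars below) * (#stars above), the number of pairs that cross it.
import Mathlib
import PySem

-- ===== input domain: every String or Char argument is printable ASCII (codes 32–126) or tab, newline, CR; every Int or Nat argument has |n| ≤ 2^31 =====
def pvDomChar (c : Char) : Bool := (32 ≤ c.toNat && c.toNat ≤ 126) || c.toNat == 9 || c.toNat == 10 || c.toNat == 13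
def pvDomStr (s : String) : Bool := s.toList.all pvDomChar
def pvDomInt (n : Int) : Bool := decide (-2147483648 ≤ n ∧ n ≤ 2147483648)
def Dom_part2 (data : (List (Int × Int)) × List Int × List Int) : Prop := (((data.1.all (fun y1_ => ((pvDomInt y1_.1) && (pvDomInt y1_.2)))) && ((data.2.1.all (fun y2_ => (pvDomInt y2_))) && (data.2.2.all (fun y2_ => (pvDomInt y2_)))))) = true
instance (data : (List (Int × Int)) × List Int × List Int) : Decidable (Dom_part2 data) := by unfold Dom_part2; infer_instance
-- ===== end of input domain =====

-- B replaces A's per-pair scan of the empty-line lists by counting, once per empty line,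
-- the pairs that cross it ((#stars below) * (#stars above)) — objective: faster.

-- ===== PORT A =====
def distance_1d (coord1 coord2 : Int) (expanding : List Int) (factor : Int) : Int :=
  let c1 := min coord1 coord2
  let c2 := max coord1 coord2
  (c2 - c1) + factor * ((expanding.map (fun n => if c1 < n ∧ n < c2 then (1:Int) else 0)).sum)

-- itertools.combinations(stars, 2), in Python's order
def combos2 {α : Type} : List α → List (α × α)
  | [] => []
  | x :: t => t.map (fun y => (x, y)) ++ combos2 t

def part2 (data : (List (Int × Int)) × List Int × List Int) : Int :=
  let factor : Int := 10 ^ 6 - 1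
  (combos2 data.1).foldl (fun total p =>
    total + distance_1d p.1.1 p.2.1 data.2.1 factor
          + distance_1d p.1.2 p.2.2 data.2.2 factor) 0

-- ===== PORT B =====
-- the while/for pair loop of _axis_total: peel the head, add |head - d| for later d
def pairAbs : List Int → Int
  | [] => 0
  | c :: rest => (rest.map (fun d => |c - d|)).sum + pairAbs rest

def axisTotal (coords expanding : List Int) (factor : Int) : Int :=
  pairAbs coords +
  (expanding.map (fun n =>
      factor * ((coords.filter (fun c => c < n)).length : Int)
             * ((coords.filter (fun c => n < c)).length : Int))).sum

def part2_alt (data : (List (Int × Int)) × List Int × List Int) : Int :=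
  let factor : Int := 10 ^ 6 - 1
  axisTotal (data.1.map Prod.fst) data.2.1 factor +
  axisTotal (data.1.map Prod.snd) data.2.2 factor

-- ===== PRECONDITION & SPEC =====
def Spec_part2 (data : (List (Int × Int)) × List Int × List Int) (out : Int) : Prop := out = part2_alt data
instance (data : (List (Int × Int)) × List Int × List Int) (out : Int) : Decidable (Spec_part2 data out) := by unfold Spec_part2; infer_instance

-- ===== CLAIM (what is proved, stated in full; the proofs are below) =====
def Claim_equal_part2 : Prop := ∀ (data : (List (Int × Int)) × List Int × List Int), Dom_part2 data → Spec_part2 data (part2 data)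

-- ===== LEMMAS AND PROOFS =====

-- A's accumulation loop as two map-sums
theorem foldl_add2 {α : Type} (l : List α) (f g : α → Int) (a : Int) :
    l.foldl (fun t p => t + f p + g p) a = a + (l.map f).sum + (l.map g).sum := by
  induction l generalizing a with
  | nil => simp
  | cons x t ih => simp [List.foldl_cons, ih]; ring

theorem sum_map_add {β : Type} (l : List β) (f g : β → Int) :
    (l.map (fun y => f y + g y)).sum = (l.map f).sum + (l.map g).sum := by
  induction l with
  | nil => simp
  | cons x t ih => simp [ih]; ring

theorem sum_map_mul_left {β : Type} (l : List β) (f : Int) (g : β → Int) :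
    (l.map (fun x => f * g x)).sum = f * (l.map g).sum := by
  induction l with
  | nil => simp
  | cons x t ih => simp [ih]; ring

theorem sum_comm_list {α β : Type} (l : List α) (m : List β) (f : α → β → Int) :
    (l.map (fun x => (m.map (f x)).sum)).sum = (m.map (fun y => (l.map (fun x => f x y)).sum)).sum := by
  induction l with
  | nil => simp
  | cons x t ih =>
      simp only [List.map_cons, List.sum_cons, ih]
      rw [sum_map_add m (f x) (fun y => (t.map (fun x => f x y)).sum)]

theorem combos2_map {α β : Type} (f : α → β) (l : List α) :
    combos2 (l.map f) = (combos2 l).map (fun p => (f p.1, f p.2)) := by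
  induction l with
  | nil => rfl
  | cons x t ih => simp [combos2, ih, List.map_map, Function.comp]

-- max - min is |difference|
theorem max_sub_min (a b : Int) : max a b - min a b = |a - b| := by
  rcases le_total a b with h | h
  · rw [max_eq_right h, min_eq_left h, abs_of_nonpos (by omega)]; ring
  · rw [max_eq_left h, min_eq_right h, abs_of_nonneg (by omega)]

-- one pair against one empty line, split by which side the head is on
theorem btw_split (n x : Int) : ∀ y : Int,
    (if min x y < n ∧ n < max x y then (1:Int) else 0) =
      (if x < n then (if n < y then (1:Int) else 0) else 0) +
      (if n < x then (if y < n then (1:Int) else 0) else 0) := by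
  intro y
  rcases le_total x y with h | h
  · rw [min_eq_left h, max_eq_right h]; split_ifs <;> omega
  · rw [min_eq_right h, max_eq_left h]; split_ifs <;> omega

theorem sum_ite_gt (n : Int) (t : List Int) :
    (t.map (fun y => if n < y then (1:Int) else 0)).sum = ((t.filter (fun c => n < c)).length : Int) := by
  induction t with
  | nil => simp
  | cons y s ih =>
      rw [List.map_cons, List.sum_cons, ih]
      by_cases h : n < y <;> simp [h] <;> omega

theorem sum_ite_lt (n : Int) (t : List Int) :
    (t.map (fun y => if y < n then (1:Int) else 0)).sum = ((t.filter (fun c => c < n)).length : Int) := by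
  induction t with
  | nil => simp
  | cons y s ih =>
      rw [List.map_cons, List.sum_cons, ih]
      by_cases h : y < n <;> simp [h] <;> omega

-- the pairs crossing one empty line n: (#coords below n) * (#coords above n)
theorem btw_count (n : Int) (l : List Int) :
    ((combos2 l).map (fun p => if min p.1 p.2 < n ∧ n < max p.1 p.2 then (1:Int) else 0)).sum =
      ((l.filter (fun c => c < n)).length : Int) * ((l.filter (fun c => n < c)).length : Int) := by
  induction l with
  | nil => simp [combos2]
  | cons x t ih =>
      simp only [combos2, List.map_append, List.sum_append, List.map_map]
      have hhead :
          (t.map (fun y => if min x y < n ∧ n < max x y then (1:Int) else 0)).sum =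
            (if x < n then ((t.filter (fun c => n < c)).length : Int) else 0) +
            (if n < x then ((t.filter (fun c => c < n)).length : Int) else 0) := by
        rw [show (fun y => if min x y < n ∧ n < max x y then (1:Int) else 0) =
              (fun y => (if x < n then (if n < y then (1:Int) else 0) else 0) +
                        (if n < x then (if y < n then (1:Int) else 0) else 0)) from
              funext (btw_split n x)]
        rw [sum_map_add]
        by_cases h1 : x < n <;> by_cases h2 : n < x <;>
          simp [h1, h2, sum_ite_gt, sum_ite_lt]
      have hcomp : ((fun p : Int × Int => if min p.1 p.2 < n ∧ n < max p.1 p.2 then (1:Int) else 0) ∘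
            fun y => (x, y)) = fun y => if min x y < n ∧ n < max x y then (1:Int) else 0 := rfl
      rw [hcomp, hhead, ih]
      by_cases h1 : x < n <;> by_cases h2 : n < x <;>
        simp [h1, h2] <;> ring_nf <;> try omega

-- the pairwise |difference| part of one axis
theorem pair_abs_sum (l : List Int) :
    ((combos2 l).map (fun p => |p.1 - p.2|)).sum = pairAbs l := by
  induction l with
  | nil => rfl
  | cons x t ih =>
      simp only [combos2, List.map_append, List.sum_append, List.map_map, pairAbs, ih]
      rfl

-- whole axis: A's per-pair distances sum to B's axisTotal
theorem axis_sum (l E : List Int) (f : Int) :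
    ((combos2 l).map (fun p => distance_1d p.1 p.2 E f)).sum = axisTotal l E f := by
  rw [show (fun p : Int × Int => distance_1d p.1 p.2 E f) =
        (fun p : Int × Int => (fun q : Int × Int => |q.1 - q.2|) p +
          (fun q : Int × Int => f * ((E.map (fun n =>
            if min q.1 q.2 < n ∧ n < max q.1 q.2 then (1:Int) else 0)).sum)) p) from
      funext (fun p => by simp only [distance_1d]; rw [max_sub_min])]
  rw [sum_map_add, pair_abs_sum,
    sum_map_mul_left (combos2 l) f
      (fun q : Int × Int => (E.map (fun n =>
        if min q.1 q.2 < n ∧ n < max q.1 q.2 then (1:Int) else 0)).sum),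
    sum_comm_list]
  unfold axisTotal
  congr 1
  rw [List.map_congr_left (fun n _ => btw_count n l),
    ← sum_map_mul_left E f
      (fun n => ((l.filter (fun c => c < n)).length : Int) * ((l.filter (fun c => n < c)).length : Int))]
  exact List.map_congr_left (fun n _ => (mul_assoc f _ _).symm) ▸ rfl

-- ===== VERDICT (by name: the statement is the Claim_ definition above) =====
theorem part2_spec : Claim_equal_part2 := by
  intro data _
  show part2 data = part2_alt data
  obtain ⟨stars, rows, cols⟩ := data
  simp only [part2, part2_alt]
  rw [foldl_add2]
  have hx : ((combos2 stars).map (fun p => distance_1d p.1.1 p.2.1 rows (10 ^ 6 - 1))).sum =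
      axisTotal (stars.map Prod.fst) rows (10 ^ 6 - 1) := by
    rw [← axis_sum, combos2_map, List.map_map]
    rfl
  have hy : ((combos2 stars).map (fun p => distance_1d p.1.2 p.2.2 cols (10 ^ 6 - 1))).sum =
      axisTotal (stars.map Prod.snd) cols (10 ^ 6 - 1) := by
    rw [← axis_sum, combos2_map, List.map_map]
    rfl
  rw [hx, hy]
  ring
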